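-- pv_equiv track=rewrite | github.com/Dvip07/tag-governance-cascon2025-artifact | scripts/step_3/validate_tags_nlu.py | find_matching_chunk
-- ===== SOURCE A (Python) =====
-- def find_matching_chunk(hlj_chunks: list, hlj_id: str, req_id: str) -> dict | None:
--     # direct
--     for ch in hlj_chunks:
--         if ch.get("id") == hlj_id or ch.get("source_hlj_id") == hlj_id or (req_id in ch.get("id", "")):
--             return ch
--     # fuzzy
--     for ch in hlj_chunks:
--         if hlj_id.lower() in ch.get("id", "").lower():
--             return ch
--     return None
-- ===== SOURCE B (Python) =====
-- def find_matching_chunk(hlj_chunks: list, hlj_id: str, req_id: str) -> dict | None: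
--     # Single pass: return a direct match immediately; remember the first fuzzy match
--     # as a deferred fallback and return it only if no direct match exists.
--     fuzzy = None
--     hlj_lower = hlj_id.lower()
--     for ch in hlj_chunks:
--         cid = ch.get("id", "")
--         if ch.get("id") == hlj_id or ch.get("source_hlj_id") == hlj_id or req_id in cid:
--             return ch
--         if fuzzy is None and hlj_lower in cid.lower():
--             fuzzy = ch
--     return fuzzy
-- ===== Notes on version B (the rewrite author's own statement) =====
-- stated objective: simpler
-- what changed: Replaced A's two sequential passes (direct scan, then a second fuzzy scan) by one pass that returns a direct match immediately and defers the first fuzzy match as a fallback returned after the loop; hlj_id.lower() is hoisted out of the loop.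
import Mathlib
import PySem

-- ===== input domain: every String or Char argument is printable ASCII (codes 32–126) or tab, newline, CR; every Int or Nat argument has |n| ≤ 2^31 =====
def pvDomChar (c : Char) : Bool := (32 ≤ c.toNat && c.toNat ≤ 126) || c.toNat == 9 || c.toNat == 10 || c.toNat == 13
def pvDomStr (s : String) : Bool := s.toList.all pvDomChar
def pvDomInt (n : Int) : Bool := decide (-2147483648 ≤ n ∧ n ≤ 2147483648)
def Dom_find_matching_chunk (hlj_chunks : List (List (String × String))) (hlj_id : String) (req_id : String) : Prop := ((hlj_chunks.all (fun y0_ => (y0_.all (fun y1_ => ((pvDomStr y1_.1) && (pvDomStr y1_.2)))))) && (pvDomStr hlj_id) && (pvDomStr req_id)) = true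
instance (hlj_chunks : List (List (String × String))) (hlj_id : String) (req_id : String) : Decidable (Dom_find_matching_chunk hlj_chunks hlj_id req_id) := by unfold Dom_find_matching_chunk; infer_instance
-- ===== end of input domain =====

-- ===== PORT A =====
-- One honest line: B replaces A's two sequential scans by a single pass that
-- defers the first fuzzy match as a fallback (objective: simpler).
-- shared helpers: the two match conditions, exactly as A's Python writes them
def pvDirect (hlj_id req_id : String) (ch : List (String × String)) : Bool :=
  ((PySem.Dict.mk ch).get? "id" == some hlj_id)
    || ((PySem.Dict.mk ch).get? "source_hlj_id" == some hlj_id)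
    || PySem.Str.isIn req_id ((PySem.Dict.mk ch).getD "id" "")

def pvFuzzy (hlj_id : String) (ch : List (String × String)) : Bool :=
  PySem.Str.isIn (PySem.Str.lower hlj_id) (PySem.Str.lower ((PySem.Dict.mk ch).getD "id" ""))

-- A's first loop: first direct match
def pvScanDirect (hlj_id req_id : String) : List (List (String × String)) → Option (List (String × String))
  | [] => none
  | ch :: rest => if pvDirect hlj_id req_id ch then some ch else pvScanDirect hlj_id req_id rest

-- A's second loop: first fuzzy match
def pvScanFuzzy (hlj_id : String) : List (List (String × String)) → Option (List (String × String))
  | [] => none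
  | ch :: rest => if pvFuzzy hlj_id ch then some ch else pvScanFuzzy hlj_id rest

def find_matching_chunk (hlj_chunks : List (List (String × String))) (hlj_id : String) (req_id : String) : Option (List (String × String)) :=
  match pvScanDirect hlj_id req_id hlj_chunks with
  | some ch => some ch
  | none => pvScanFuzzy hlj_id hlj_chunks

-- ===== PORT B =====
-- B's single loop, carrying the deferred fuzzy fallback
def pvScanB (hlj_id req_id : String) : List (List (String × String)) → Option (List (String × String)) → Option (List (String × String))
  | [], fuzzy => fuzzy
  | ch :: rest, fuzzy =>
      if pvDirect hlj_id req_id ch then some ch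
      else pvScanB hlj_id req_id rest
        (if fuzzy.isNone && pvFuzzy hlj_id ch then some ch else fuzzy)

def find_matching_chunk_alt (hlj_chunks : List (List (String × String))) (hlj_id : String) (req_id : String) : Option (List (String × String)) :=
  pvScanB hlj_id req_id hlj_chunks none

-- ===== PRECONDITION & SPEC =====
def Spec_find_matching_chunk (hlj_chunks : List (List (String × String))) (hlj_id : String) (req_id : String) (out : Option (List (String × String))) : Prop := out = find_matching_chunk_alt hlj_chunks hlj_id req_id
instance (hlj_chunks : List (List (String × String))) (hlj_id : String) (req_id : String) (out : Option (List (String × String))) : Decidable (Spec_find_matching_chunk hlj_chunks hlj_id req_id out) := by unfold Spec_find_matching_chunk; infer_instance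

-- ===== CLAIM (what is proved, stated in full; the proofs are below) =====
def Claim_equal_find_matching_chunk : Prop := ∀ (hlj_chunks : List (List (String × String))) (hlj_id : String) (req_id : String), Dom_find_matching_chunk hlj_chunks hlj_id req_id → Spec_find_matching_chunk hlj_chunks hlj_id req_id (find_matching_chunk hlj_chunks hlj_id req_id)

-- ===== LEMMAS AND PROOFS =====
-- loop invariant: B's scan with fallback `fuzzy` equals "first direct match,
-- else `fuzzy`, else first fuzzy match"
theorem pvScanB_eq (hlj_id req_id : String) (chunks : List (List (String × String))) :
    ∀ fuzzy, pvScanB hlj_id req_id chunks fuzzy =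
      match pvScanDirect hlj_id req_id chunks with
      | some ch => some ch
      | none => fuzzy.or (pvScanFuzzy hlj_id chunks) := by
  induction chunks with
  | nil => intro fuzzy; simp [pvScanB, pvScanDirect, pvScanFuzzy]
  | cons ch rest ih =>
      intro fuzzy
      simp only [pvScanB, pvScanDirect, pvScanFuzzy]
      by_cases hd : pvDirect hlj_id req_id ch
      · simp [hd]
      · simp only [hd, ih]
        cases hres : pvScanDirect hlj_id req_id rest with
        | some c => simp
        | none =>
            cases fuzzy with
            | some f => simp
            | none =>
                by_cases hf : pvFuzzy hlj_id ch <;> simp [hf]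

-- ===== VERDICT (by name: the statement is the Claim_ definition above) =====
theorem find_matching_chunk_spec : Claim_equal_find_matching_chunk := by
  intro hlj_chunks hlj_id req_id _
  unfold Spec_find_matching_chunk find_matching_chunk find_matching_chunk_alt
  rw [pvScanB_eq]
  cases pvScanDirect hlj_id req_id hlj_chunks <;> simp
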